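-- pv_equiv track=rewrite | github.com/kevinvandever/mcpress-chatbot | backend/test_password_auth_properties.py | _count_violated_rules
-- ===== SOURCE A (Python) =====
-- SPECIAL_CHARS = "!@#$%^&*()_+-=[]{}|;:,.<>?"
--
-- MIN_LENGTH = 8
--
-- def _count_violated_rules(password: str) -> int:
--     """Count how many password rules a given string violates."""
--     count = 0
--     if len(password) < MIN_LENGTH:
--         count += 1
--     if not any(c.isupper() for c in password):
--         count += 1
--     if not any(c.islower() for c in password):
--         count += 1
--     if not any(c.isdigit() for c in password):
--         count += 1
--     if not any(c in SPECIAL_CHARS for c in password):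
--         count += 1
--     return count
-- ===== SOURCE B (Python) =====
-- SPECIAL_CHARS = "!@#$%^&*()_+-=[]{}|;:,.<>?"
--
-- MIN_LENGTH = 8
--
-- def _count_violated_rules(password: str) -> int:
--     """Single pass: accumulate four booleans, then tally missing rules."""
--     has_upper = has_lower = has_digit = has_special = False
--     for c in password:
--         if c.isupper():
--             has_upper = True
--         if c.islower():
--             has_lower = True
--         if c.isdigit():
--             has_digit = True
--         if c in SPECIAL_CHARS:
--             has_special = True
--     count = 0
--     if len(password) < MIN_LENGTH:
--         count += 1
--     for flag in (has_upper, has_lower, has_digit, has_special):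
--         if not flag:
--             count += 1
--     return count
-- ===== Notes on version B (the rewrite author's own statement) =====
-- stated objective: alternative
-- what changed: B replaces A's four independent any() scans over the password with a single traversal accumulating four booleans, then tallies the unmet rules from the flags.
import Mathlib
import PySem

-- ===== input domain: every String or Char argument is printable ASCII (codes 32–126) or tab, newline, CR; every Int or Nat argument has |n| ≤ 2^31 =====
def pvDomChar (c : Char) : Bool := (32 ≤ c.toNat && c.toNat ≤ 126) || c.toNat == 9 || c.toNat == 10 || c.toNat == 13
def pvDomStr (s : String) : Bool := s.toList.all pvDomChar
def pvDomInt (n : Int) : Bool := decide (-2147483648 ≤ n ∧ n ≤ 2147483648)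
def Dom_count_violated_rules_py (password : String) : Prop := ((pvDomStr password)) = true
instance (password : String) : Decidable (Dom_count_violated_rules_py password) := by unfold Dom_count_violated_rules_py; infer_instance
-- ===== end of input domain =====

-- B replaces A's four independent any() scans with one traversal accumulating four booleans; objective: alternative.
-- ===== PORT A =====
def pvSpecial : List Char := "!@#$%^&*()_+-=[]{}|;:,.<>?".toList

-- literal port: four separate any() scans, then a final special-chars scan ('c in SPECIAL_CHARS'
-- for a single char c is exact membership of c among the special characters)
def count_violated_rules_py (password : String) : Int :=
  let cs := password.toList
  let count : Int := 0
  let count := if cs.length < 8 then count + 1 else count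
  let count := if !(cs.any PySem.Chars.isupper) then count + 1 else count
  let count := if !(cs.any PySem.Chars.islower) then count + 1 else count
  let count := if !(cs.any PySem.Chars.isdigit) then count + 1 else count
  let count := if !(cs.any (fun c => pvSpecial.contains c)) then count + 1 else count
  count

-- ===== PORT B =====
def count_violated_rules_py_alt (password : String) : Int :=
  let flags := password.toList.foldl
    (fun (f : Bool × Bool × Bool × Bool) c =>
      ((if PySem.Chars.isupper c then true else f.1),
       (if PySem.Chars.islower c then true else f.2.1),
       (if PySem.Chars.isdigit c then true else f.2.2.1),
       (if pvSpecial.contains c then true else f.2.2.2)))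
    (false, false, false, false)
  let count : Int := if password.toList.length < 8 then 0 + 1 else 0
  [flags.1, flags.2.1, flags.2.2.1, flags.2.2.2].foldl
    (fun k flag => if !flag then k + 1 else k) count

-- ===== PRECONDITION & SPEC =====
def Spec_count_violated_rules_py (password : String) (out : Int) : Prop := out = count_violated_rules_py_alt password
instance (password : String) (out : Int) : Decidable (Spec_count_violated_rules_py password out) := by unfold Spec_count_violated_rules_py; infer_instance

-- ===== CLAIM =====
def Claim_equal_count_violated_rules_py : Prop := ∀ (password : String), Dom_count_violated_rules_py password → Spec_count_violated_rules_py password (count_violated_rules_py password)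

-- ===== LEMMAS AND PROOFS =====
-- B's accumulated flags are exactly A's four any() scans, disjoined with the starting flags.
theorem pv_flags_eq (cs : List Char) (f : Bool × Bool × Bool × Bool) :
    cs.foldl (fun (f : Bool × Bool × Bool × Bool) c =>
      ((if PySem.Chars.isupper c then true else f.1),
       (if PySem.Chars.islower c then true else f.2.1),
       (if PySem.Chars.isdigit c then true else f.2.2.1),
       (if pvSpecial.contains c then true else f.2.2.2))) f
    = (f.1 || cs.any PySem.Chars.isupper,
       f.2.1 || cs.any PySem.Chars.islower,
       f.2.2.1 || cs.any PySem.Chars.isdigit,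
       f.2.2.2 || cs.any (fun c => pvSpecial.contains c)) := by
  induction cs generalizing f with
  | nil => simp
  | cons c cs ih =>
    simp only [List.foldl_cons, List.any_cons]
    rw [ih]
    obtain ⟨a, b, d, e⟩ := f
    simp [Bool.if_true_left, Bool.or_assoc, Bool.or_comm, Bool.or_left_comm]

-- ===== VERDICT =====
theorem count_violated_rules_py_spec : Claim_equal_count_violated_rules_py := by
  intro password _
  unfold Spec_count_violated_rules_py
  simp only [count_violated_rules_py, count_violated_rules_py_alt, pv_flags_eq, Bool.false_or]
  generalize (if password.toList.length < 8 then (0 : Int) + 1 else 0) = base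
  generalize password.toList.any PySem.Chars.isupper = u
  generalize password.toList.any PySem.Chars.islower = l
  generalize password.toList.any PySem.Chars.isdigit = d
  generalize (password.toList.any fun c => pvSpecial.contains c) = sp
  cases u <;> cases l <;> cases d <;> cases sp <;> simp [List.foldl]
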